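-- pv_equiv track=rewrite | github.com/treysonbrown/clear-oled | transcription_service.py | _find_overlap_prefix_length
-- ===== SOURCE A (Python) =====
-- def _find_overlap_prefix_length(baseline_tokens, incoming_tokens):
--     if not baseline_tokens or not incoming_tokens:
--         return 0
--
--     max_prefix = min(len(baseline_tokens), len(incoming_tokens))
--     for prefix_length in range(max_prefix, 0, -1):
--         prefix = incoming_tokens[:prefix_length]
--         last_start = len(baseline_tokens) - prefix_length
--         for start in range(last_start + 1):
--             if baseline_tokens[start : start + prefix_length] == prefix:
--                 return prefix_length
--     return 0
-- ===== SOURCE B (Python) =====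
-- def _lcp(xs, ys):
--     k = 0
--     for x, y in zip(xs, ys):
--         if x != y:
--             return k
--         k += 1
--     return k
--
--
-- def _find_overlap_prefix_length(baseline_tokens, incoming_tokens):
--     best = 0
--     for start in range(len(baseline_tokens)):
--         best = max(best, _lcp(baseline_tokens[start:], incoming_tokens))
--     return best
-- ===== Notes on version B (the rewrite author's own statement) =====
-- stated objective: faster
-- what changed: A searches prefix lengths in descending order, re-scanning baseline with a fresh slice comparison for each (length, start) pair; B makes one pass over the baseline suffixes, computing the longest common prefix with incoming at each start and taking the maximum.
import Mathlib
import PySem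

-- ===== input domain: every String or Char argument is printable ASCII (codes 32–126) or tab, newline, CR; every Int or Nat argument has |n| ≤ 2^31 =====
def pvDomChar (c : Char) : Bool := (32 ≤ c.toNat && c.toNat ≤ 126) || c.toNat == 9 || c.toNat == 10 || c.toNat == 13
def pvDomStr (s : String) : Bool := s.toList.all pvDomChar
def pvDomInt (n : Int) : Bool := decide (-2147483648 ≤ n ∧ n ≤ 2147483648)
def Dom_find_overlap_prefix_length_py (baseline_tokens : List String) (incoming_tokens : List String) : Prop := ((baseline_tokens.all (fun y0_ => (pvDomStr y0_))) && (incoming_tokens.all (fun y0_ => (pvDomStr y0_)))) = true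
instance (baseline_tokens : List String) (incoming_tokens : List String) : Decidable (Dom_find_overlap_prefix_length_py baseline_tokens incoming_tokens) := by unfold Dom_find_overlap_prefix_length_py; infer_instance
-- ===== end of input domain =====

-- B replaces A's descending search over prefix lengths (a slice comparison per (length, start)
-- pair) by a single pass over baseline suffixes taking the maximal common prefix with incoming;
-- measured faster.

-- ===== PORT A =====
-- inner 'for start in range(last_start + 1): if baseline[start:start+p] == prefix: return p'
def pvAInner (b : List String) (pre : List String) (p : Int) : List Int → Option Int
  | [] => none
  | s :: rest =>
      if PySem.List.slice b (some s) (some (s + p)) = pre then some p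
      else pvAInner b pre p rest

-- outer 'for prefix_length in range(max_prefix, 0, -1)' with early return
def pvAOuter (b i : List String) : List Int → Int
  | [] => 0
  | p :: rest =>
      match pvAInner b (PySem.List.slice i none (some p)) p
              (PySem.List.pyRange 0 ((b.length : Int) - p + 1) 1) with
      | some r => r
      | none => pvAOuter b i rest

def find_overlap_prefix_length_py (baseline_tokens : List String) (incoming_tokens : List String) : Int :=
  if baseline_tokens = [] ∨ incoming_tokens = [] then 0
  else pvAOuter baseline_tokens incoming_tokens
        (PySem.List.pyRange (min (baseline_tokens.length : Int) (incoming_tokens.length : Int)) 0 (-1))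

-- ===== PORT B =====
-- '_lcp': zip loop counting the common prefix, early return at first mismatch
def pvLcpB : List String → List String → Int
  | x :: xs, y :: ys => if x ≠ y then 0 else 1 + pvLcpB xs ys
  | _, _ => 0

-- 'for start in range(len(baseline)): best = max(best, _lcp(baseline[start:], incoming))'
def pvLoopB (inc : List String) : List String → Int → Int
  | [], best => best
  | x :: rest, best => pvLoopB inc rest (max best (pvLcpB (x :: rest) inc))

def find_overlap_prefix_length_py_alt (baseline_tokens : List String) (incoming_tokens : List String) : Int :=
  pvLoopB incoming_tokens baseline_tokens 0

-- ===== PRECONDITION & SPEC =====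
def Spec_find_overlap_prefix_length_py (baseline_tokens : List String) (incoming_tokens : List String) (out : Int) : Prop := out = find_overlap_prefix_length_py_alt baseline_tokens incoming_tokens
instance (baseline_tokens : List String) (incoming_tokens : List String) (out : Int) : Decidable (Spec_find_overlap_prefix_length_py baseline_tokens incoming_tokens out) := by unfold Spec_find_overlap_prefix_length_py; infer_instance

-- ===== CLAIM (what is proved, stated in full; the proofs are below) =====
def Claim_equal_find_overlap_prefix_length_py : Prop := ∀ (baseline_tokens : List String) (incoming_tokens : List String), Dom_find_overlap_prefix_length_py baseline_tokens incoming_tokens → Spec_find_overlap_prefix_length_py baseline_tokens incoming_tokens (find_overlap_prefix_length_py baseline_tokens incoming_tokens)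

-- ===== LEMMAS AND PROOFS =====

-- Nat-valued longest common prefix (proof mirror of pvLcpB)
def lcpN : List String → List String → Nat
  | x :: xs, y :: ys => if x = y then lcpN xs ys + 1 else 0
  | _, _ => 0

-- Nat-valued maximum of lcpN over all suffixes (proof mirror of pvLoopB)
def bmaxN (i : List String) : List String → Nat
  | [] => 0
  | x :: r => max (lcpN (x :: r) i) (bmaxN i r)

theorem pvLcpB_cast (xs ys : List String) : pvLcpB xs ys = (lcpN xs ys : Int) := by
  fun_induction pvLcpB xs ys <;> simp_all [lcpN] <;> ring


theorem lcpN_le_left (xs ys : List String) : lcpN xs ys ≤ xs.length := by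
  fun_induction lcpN xs ys <;> simp_all


theorem lcpN_le_right (xs ys : List String) : lcpN xs ys ≤ ys.length := by
  fun_induction lcpN xs ys <;> simp_all


theorem take_eq_of_le_lcpN (xs ys : List String) (q : Nat) (h : q ≤ lcpN xs ys) :
    xs.take q = ys.take q := by
  induction xs generalizing ys q with
  | nil => cases ys <;> simp_all [lcpN]
  | cons x xs ih =>
    cases ys with
    | nil => simp_all [lcpN]
    | cons y ys =>
      by_cases hxy : x = y
      · cases q with
        | zero => simp
        | succ q =>
          simp only [lcpN, if_pos hxy] at h
          simp [hxy, List.take_succ_cons, ih ys q (by omega)]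
      · simp [lcpN, hxy] at h
        simp [h]


theorem le_lcpN_of_take_eq (xs ys : List String) (q : Nat) (h : xs.take q = ys.take q)
    (h1 : q ≤ xs.length) (h2 : q ≤ ys.length) : q ≤ lcpN xs ys := by
  induction xs generalizing ys q with
  | nil => simp_all
  | cons x xs ih =>
    cases ys with
    | nil => simp_all
    | cons y ys =>
      cases q with
      | zero => omega
      | succ q =>
        simp only [List.take_succ_cons, List.cons.injEq] at h
        simp only [lcpN, if_pos h.1]
        have := ih ys q h.2 (by simpa using h1) (by simpa using h2)
        omega


theorem lcpN_drop_le_bmaxN (i b : List String) (s : Nat) : lcpN (b.drop s) i ≤ bmaxN i b := by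
  induction b generalizing s with
  | nil =>
    cases i <;> simp [lcpN.eq_def, bmaxN]
  | cons x r ih =>
    cases s with
    | zero => simp [bmaxN]
    | succ s => simpa [bmaxN] using Or.inr (ih s)


theorem exists_drop_bmaxN (i b : List String) :
    ∃ s : Nat, s ≤ b.length ∧ bmaxN i b ≤ lcpN (b.drop s) i := by
  induction b with
  | nil => exact ⟨0, by simp [bmaxN]⟩
  | cons x r ih =>
    obtain ⟨s, hs, hb⟩ := ih
    rcases Nat.le_total (lcpN (x :: r) i) (bmaxN i r) with h | h
    · exact ⟨s + 1, by simpa using hs, by simp [bmaxN]; omega⟩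
    · exact ⟨0, by simp, by simp [bmaxN]; omega⟩


theorem bmaxN_le_right (i b : List String) : bmaxN i b ≤ i.length := by
  obtain ⟨s, _, hb⟩ := exists_drop_bmaxN i b
  exact hb.trans (lcpN_le_right _ _)


theorem bmaxN_le_left (i b : List String) : bmaxN i b ≤ b.length := by
  obtain ⟨s, hs, hb⟩ := exists_drop_bmaxN i b
  have := (hb.trans (lcpN_le_left _ _))
  simp [List.length_drop] at this
  omega


-- occurrence characterization
theorem occ_iff (i b : List String) (q : Nat) (hq : q ≤ i.length) :
    (∃ s : Nat, s + q ≤ b.length ∧ (b.drop s).take q = i.take q) ↔ q ≤ bmaxN i b := by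
  constructor
  · rintro ⟨s, hsq, heq⟩
    have h1 : q ≤ (b.drop s).length := by simp [List.length_drop]; omega
    exact (le_lcpN_of_take_eq _ _ q heq h1 hq).trans (lcpN_drop_le_bmaxN i b s)
  · intro h
    obtain ⟨s, hs, hb⟩ := exists_drop_bmaxN i b
    have hql : q ≤ lcpN (b.drop s) i := h.trans hb
    have hlen : lcpN (b.drop s) i ≤ b.length - s := by
      simpa [List.length_drop] using lcpN_le_left (b.drop s) i
    exact ⟨s, by omega, take_eq_of_le_lcpN _ _ q hql⟩


theorem pvLoopB_eq (i : List String) : ∀ (l : List String) (best : Int), 0 ≤ best →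
    pvLoopB i l best = max best (bmaxN i l : Int) := by
  intro l
  induction l with
  | nil => intro best hb; simp [pvLoopB, bmaxN]; omega
  | cons x r ih =>
    intro best hb
    rw [pvLoopB, ih _ (by rw [pvLcpB_cast]; positivity)]
    simp only [pvLcpB_cast, bmaxN]
    push_cast
    omega


theorem bmaxN_nil_left (b : List String) : bmaxN [] b = 0 := by
  induction b with
  | nil => rfl
  | cons x r ih => simp [bmaxN, lcpN, ih]

theorem alt_eq_bmaxN (b i : List String) :
    find_overlap_prefix_length_py_alt b i = (bmaxN i b : Int) := by
  simp [find_overlap_prefix_length_py_alt, pvLoopB_eq i b 0 le_rfl]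



theorem pvAInner_some (b pre : List String) (p : Int) (starts : List Int)
    (h : ∃ s ∈ starts, PySem.List.slice b (some s) (some (s + p)) = pre) :
    pvAInner b pre p starts = some p := by
  induction starts with
  | nil => simp at h
  | cons s rest ih =>
    simp only [pvAInner]
    rcases h with ⟨t, ht, heq⟩
    rcases List.mem_cons.mp ht with rfl | ht
    · simp [heq]
    · split_ifs with h'
      · rfl
      · exact ih ⟨t, ht, heq⟩


theorem pvAInner_none (b pre : List String) (p : Int) (starts : List Int)
    (h : ∀ s ∈ starts, PySem.List.slice b (some s) (some (s + p)) ≠ pre) :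
    pvAInner b pre p starts = none := by
  induction starts with
  | nil => rfl
  | cons s rest ih =>
    simp only [pvAInner]
    rw [if_neg (h s (by simp))]
    exact ih fun t ht => h t (by simp [ht])


theorem success_iff (b i : List String) (p : Nat) (hpm : p ≤ i.length) :
    (∃ s ∈ PySem.List.pyRange 0 ((b.length : Int) - (p : Int) + 1) 1,
        PySem.List.slice b (some s) (some (s + (p : Int))) = PySem.List.slice i none (some (p : Int)))
      ↔ p ≤ bmaxN i b := by
  rw [← occ_iff i b p hpm]
  constructor
  · rintro ⟨s, hs, heq⟩
    rw [PySem.List.mem_pyRange_one] at hs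
    obtain ⟨t, rfl⟩ := Int.eq_ofNat_of_zero_le hs.1
    rw [PySem.List.slice_natCast_add, PySem.List.slice_to_natCast] at heq
    refine ⟨t, ?_, heq⟩
    have := hs.2
    omega
  · rintro ⟨t, ht, heq⟩
    refine ⟨(t : Int), ?_, ?_⟩
    · rw [PySem.List.mem_pyRange_one]
      constructor
      · positivity
      · push_cast
        omega
    · rw [PySem.List.slice_natCast_add, PySem.List.slice_to_natCast]
      exact heq

theorem pvAOuter_eq (b i : List String) : ∀ (p : Nat), p ≤ i.length →
    pvAOuter b i (PySem.List.pyRange (p : Int) 0 (-1)) = ((min p (bmaxN i b) : Nat) : Int) := by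
  intro p
  induction p with
  | zero =>
    intro _
    rw [Nat.cast_zero, PySem.List.pyRange_neg_one_eq_nil le_rfl]
    simp [pvAOuter]
  | succ p ih =>
    intro hp
    rw [PySem.List.pyRange_neg_one_cons (by push_cast; omega)]
    simp only [pvAOuter]
    have hc : ((p + 1 : Nat) : Int) - 1 = (p : Int) := by push_cast; ring
    by_cases hb : p + 1 ≤ bmaxN i b
    · have hex := (success_iff b i (p + 1) hp).mpr hb
      push_cast at hex ⊢
      rw [pvAInner_some _ _ _ _ hex]
      show ((p : Int) + 1) = min ((p : Int) + 1) ((bmaxN i b : Nat) : Int)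
      have hbi : ((p : Int) + 1) ≤ ((bmaxN i b : Nat) : Int) := by exact_mod_cast hb
      omega
    · have hnone : ∀ s ∈ PySem.List.pyRange 0 ((b.length : Int) - ((p + 1 : Nat) : Int) + 1) 1,
          PySem.List.slice b (some s) (some (s + ((p + 1 : Nat) : Int))) ≠
            PySem.List.slice i none (some ((p + 1 : Nat) : Int)) := by
        intro s hs heq
        exact hb ((success_iff b i (p + 1) hp).mp ⟨s, hs, heq⟩)
      push_cast at hnone ⊢
      rw [pvAInner_none _ _ _ _ hnone]
      show pvAOuter b i (PySem.List.pyRange ((p : Int) + 1 - 1) 0 (-1)) = _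
      rw [show ((p : Int) + 1 - 1) = ((p : Nat) : Int) by ring]
      rw [ih (by omega)]
      push_cast
      omega

-- ===== VERDICT (by name: the statement is the Claim_ definition above) =====
theorem find_overlap_prefix_length_py_spec : Claim_equal_find_overlap_prefix_length_py := by
  intro b i _
  unfold Spec_find_overlap_prefix_length_py
  rw [alt_eq_bmaxN]
  unfold find_overlap_prefix_length_py
  split_ifs with h
  · rcases h with rfl | rfl
    · simp [bmaxN]
    · simp [bmaxN_nil_left]
  · rw [not_or] at h
    rw [show min ((b.length : Int)) ((i.length : Int)) = ((min b.length i.length : Nat) : Int) by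
      push_cast; rfl]
    rw [pvAOuter_eq b i (min b.length i.length) (min_le_right _ _)]
    have h1 := bmaxN_le_left i b
    have h2 := bmaxN_le_right i b
    congr 1
    omega
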